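-- pv_equiv track=rewrite | github.com/ericweigle/advent-of-code | 2023/11/day11-1.py | effective_row
-- ===== SOURCE A (Python) =====
-- def effective_row(data, expansion_rate):
--   result = dict()
--   for r in range(len(data)):
--     row = data[r]
--     if len(set(row)) == 1 and row[0] =='.':
--       result[r] = result.get(r-1, 0)+expansion_rate
--     else:
--       result[r] = result.get(r-1, 0)+1
--   return result
-- ===== SOURCE B (Python) =====
-- def effective_row(data, expansion_rate):
--   # closed form: row r's expanded offset is (r+1) + (expansion_rate-1) * (number of
--   # empty rows among rows 0..r); no running total is maintained.
--   empties = [r for r, row in enumerate(data) if set(row) == {'.'}]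
--   return {r: (r + 1) + (expansion_rate - 1) * sum(1 for e in empties if e <= r)
--           for r in range(len(data))}
-- ===== Notes on version B (the rewrite author's own statement) =====
-- stated objective: alternative
-- what changed: A maintains a running total in one pass, reading back the previous row's entry with result.get(r-1,0); B keeps no running total: it first lists the indices of empty rows, then computes each row's value independently by the closed-form formula (r+1) + (rate-1)*#{empty indices <= r}.
import Mathlib
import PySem

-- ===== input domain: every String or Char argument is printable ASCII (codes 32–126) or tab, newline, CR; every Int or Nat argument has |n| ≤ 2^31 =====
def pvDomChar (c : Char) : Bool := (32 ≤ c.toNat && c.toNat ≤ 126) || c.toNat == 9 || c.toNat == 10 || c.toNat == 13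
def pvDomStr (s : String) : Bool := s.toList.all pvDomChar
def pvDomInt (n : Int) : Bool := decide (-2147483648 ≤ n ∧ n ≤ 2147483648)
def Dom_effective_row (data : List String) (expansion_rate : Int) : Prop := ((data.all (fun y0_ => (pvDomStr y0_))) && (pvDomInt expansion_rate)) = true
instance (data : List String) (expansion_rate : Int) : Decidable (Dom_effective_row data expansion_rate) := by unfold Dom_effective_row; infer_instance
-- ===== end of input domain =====

-- B replaces A's single running-total pass (dict read-back of the previous row) by a
-- closed-form per-row formula over the list of empty-row indices; alternative decomposition, same values.

-- ===== PORT A =====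
-- literal port of A: for r in range(len(data)): row = data[r]; result[r] = result.get(r-1,0)+...
def effective_row (data : List String) (expansion_rate : Int) : List (Int × Int) :=
  ((PySem.List.pyRange 0 (data.length : Int) 1).foldl
    (fun (result : PySem.Dict Int Int) r =>
      let row := PySem.List.pyGetD data r ""
      if (PySem.Set.ofList row.toList).length = 1 ∧ PySem.Str.pyGet? row 0 = some '.' then
        result.insert r (result.getD (r - 1) 0 + expansion_rate)
      else
        result.insert r (result.getD (r - 1) 0 + 1))
    { items := [] }).items

-- ===== PORT B =====
-- literal port of Source B: empty-row index list, then the closed-form value for each r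
def effective_row_alt (data : List String) (expansion_rate : Int) : List (Int × Int) :=
  let empties := ((PySem.List.enumerate data 0).filter
      (fun p => PySem.Set.ofList p.2.toList == ['.'])).map Prod.fst
  (PySem.List.pyRange 0 (data.length : Int) 1).map
    (fun r => (r, (r + 1) + (expansion_rate - 1) *
      (empties.foldl (fun s e => if e ≤ r then s + 1 else s) (0 : Int))))

-- ===== PRECONDITION & SPEC =====
def Spec_effective_row (data : List String) (expansion_rate : Int) (out : List (Int × Int)) : Prop := out = effective_row_alt data expansion_rate
instance (data : List String) (expansion_rate : Int) (out : List (Int × Int)) : Decidable (Spec_effective_row data expansion_rate out) := by unfold Spec_effective_row; infer_instance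

-- ===== CLAIM (what is proved, stated in full; the proofs are below) =====
def Claim_equal_effective_row : Prop := ∀ (data : List String) (expansion_rate : Int), Dom_effective_row data expansion_rate → Spec_effective_row data expansion_rate (effective_row data expansion_rate)

-- ===== LEMMAS AND PROOFS =====

-- the per-row weight (A's classification condition)
def rowW (er : Int) (row : String) : Int :=
  if (PySem.Set.ofList row.toList).length = 1 ∧ PySem.Str.pyGet? row 0 = some '.' then er else 1

-- common reference computation: successive (index, running total) pairs
def go (er : Int) : List String → Int → Int → List (Int × Int)
  | [], _, _ => []
  | row :: rest, i, t => (i, t + rowW er row) :: go er rest (i + 1) (t + rowW er row)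

-- Python s[0] on a string, as a plain head lookup
theorem pyGet0 (s : String) : PySem.Str.pyGet? s 0 = s.toList[0]? := by
  simp [PySem.Str.pyGet?, PySem.List.pyGet?_zero]

-- B's emptiness test (set(row) == {'.'}) coincides with A's (len(set(row))==1 and row[0]=='.')
theorem empty_iff (row : String) :
    PySem.Set.ofList row.toList = ['.'] ↔
      ((PySem.Set.ofList row.toList).length = 1 ∧ PySem.Str.pyGet? row 0 = some '.') := by
  rw [pyGet0]
  constructor
  · intro h
    refine ⟨by rw [h]; rfl, ?_⟩
    cases hl : row.toList with
    | nil => rw [hl] at h; simp [PySem.Set.ofList] at h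
    | cons c l' =>
      have hc : c ∈ PySem.Set.ofList row.toList := by
        rw [PySem.Set.mem_ofList, hl]; exact List.mem_cons_self
      rw [h] at hc
      simp at hc
      simp [hc]
  · rintro ⟨hlen, h0⟩
    obtain ⟨c, hc⟩ := List.length_eq_one_iff.mp hlen
    have hmem : ('.' : Char) ∈ row.toList := List.mem_of_getElem? h0
    have hm : ('.' : Char) ∈ PySem.Set.ofList row.toList :=
      (PySem.Set.mem_ofList row.toList '.').mpr hmem
    rw [hc] at hm ⊢
    simp at hm
    rw [hm]

-- number of empty rows, as an Int
def cntE (l : List String) : Int :=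
  (l.countP (fun row => decide ((PySem.Set.ofList row.toList).length = 1 ∧ PySem.Str.pyGet? row 0 = some '.')) : Int)

theorem cntE_nil : cntE [] = 0 := rfl

theorem cntE_cons (row : String) (l : List String) :
    cntE (row :: l)
      = (if (PySem.Set.ofList row.toList).length = 1 ∧ PySem.Str.pyGet? row 0 = some '.' then 1 else 0) + cntE l := by
  by_cases h : (PySem.Set.ofList row.toList).length = 1 ∧ PySem.Str.pyGet? row 0 = some '.'
  · simp only [cntE, List.countP_cons, decide_eq_true h, if_pos h]
    push_cast
    ring
  · simp only [cntE, List.countP_cons, decide_eq_false h, if_neg h]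
    push_cast
    ring

-- weight sum over a prefix, closed form
theorem wsum_closed (er : Int) (l : List String) :
    (l.map (rowW er)).sum = (l.length : Int) + (er - 1) * cntE l := by
  induction l with
  | nil => simp [cntE_nil]
  | cons row rest ih =>
    simp only [List.map_cons, List.sum_cons, ih, cntE_cons, List.length_cons, rowW]
    split_ifs <;> push_cast <;> ring

-- counting empties with index ≤ j among the enumerated-and-filtered indices
theorem enumCount (data : List String) : ∀ (s j : Int),
    ((((PySem.List.enumerate data s).filter
        (fun p => PySem.Set.ofList p.2.toList == ['.'])).map Prod.fst).countP
        (fun e => decide (e ≤ j)) : Int)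
      = cntE (data.take (j - s + 1).toNat) := by
  induction data with
  | nil => intro s j; simp [PySem.List.enumerate_nil, cntE_nil]
  | cons row rest ih =>
    intro s j
    rw [PySem.List.enumerate_cons]
    have htail := ih (s + 1) j
    have hsub : j - (s + 1) + 1 = j - s := by ring
    rw [hsub] at htail
    by_cases hq : ((PySem.Set.ofList row.toList).length = 1 ∧ PySem.Str.pyGet? row 0 = some '.')
    · have hb : (PySem.Set.ofList row.toList == ['.']) = true :=
        beq_iff_eq.mpr ((empty_iff row).mpr hq)
      by_cases hsj : s ≤ j
      · have h1 : (j - s + 1).toNat = (j - s).toNat + 1 := by omega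
        rw [h1, List.take_succ_cons, cntE_cons, if_pos hq]
        simp only [List.filter_cons, hb, if_true, List.map_cons, List.countP_cons,
          decide_eq_true_eq, if_pos hsj]
        push_cast
        omega
      · have h1 : (j - s + 1).toNat = 0 := by omega
        have h2 : (j - s).toNat = 0 := by omega
        rw [h1, List.take_zero, cntE_nil]
        rw [h2, List.take_zero, cntE_nil] at htail
        simp only [List.filter_cons, hb, if_true, List.map_cons, List.countP_cons,
          decide_eq_true_eq, if_neg hsj]
        push_cast at htail ⊢
        omega
    · have hb : (PySem.Set.ofList row.toList == ['.']) = false :=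
        beq_eq_false_iff_ne.mpr (fun hc => hq ((empty_iff row).mp hc))
      simp only [List.filter_cons, hb, Bool.false_eq_true, if_false]
      rw [htail]
      by_cases hsj : s ≤ j
      · have h1 : (j - s + 1).toNat = (j - s).toNat + 1 := by omega
        rw [h1, List.take_succ_cons, cntE_cons, if_neg hq]
        ring
      · have h1 : (j - s + 1).toNat = 0 := by omega
        have h2 : (j - s).toNat = 0 := by omega
        rw [h1, h2]
        rfl

-- go as a map over indices, carrying the prefix weight sum
theorem go_eq_map (er : Int) : ∀ (data : List String) (i t : Int),
    go er data i t
      = (List.range data.length).map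
          (fun (j : Nat) => ((i + (j : Int)), t + ((data.take (j+1)).map (rowW er)).sum)) := by
  intro data
  induction data with
  | nil => intro i t; simp [go]
  | cons row rest ih =>
    intro i t
    simp only [go, List.length_cons, List.range_succ_eq_map, List.map_cons, List.map_map]
    congr 1
    · simp
    · rw [ih (i + 1) (t + rowW er row)]
      apply List.map_congr_left
      intro j _
      simp only [Function.comp_apply, List.take_succ_cons, List.map_cons, List.sum_cons,
        Prod.mk.injEq]
      refine ⟨?_, ?_⟩
      · push_cast; ring
      · ring

-- B equals go
theorem alt_eq_go (data : List String) (er : Int) :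
    effective_row_alt data er = go er data 0 0 := by
  unfold effective_row_alt
  rw [go_eq_map, PySem.List.pyRange_zero_natCast, List.map_map]
  apply List.map_congr_left
  intro j hj
  have hjlt : j < data.length := List.mem_range.mp hj
  simp only [Function.comp_apply, Prod.mk.injEq]
  refine ⟨by simp, ?_⟩
  rw [PySem.List.foldl_ite_add_one, enumCount data 0 (j : Int)]
  have h1 : ((j : Int) - 0 + 1).toNat = j + 1 := by omega
  rw [h1, wsum_closed]
  have h2 : ((data.take (j+1)).length : Int) = (j : Int) + 1 := by
    rw [List.length_take]
    push_cast
    omega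
  rw [h2]
  ring

-- A-side loop invariant
theorem A_loop (er : Int) (data : List String) : ∀ (m k : Nat) (d : PySem.Dict Int Int) (t : Int),
    k + m = data.length →
    (∀ p ∈ d.items, p.1 < (k : Int)) →
    d.getD ((k : Int) - 1) 0 = t →
    ((PySem.List.pyRange (k : Int) (data.length : Int) 1).foldl
      (fun (result : PySem.Dict Int Int) r =>
        let row := PySem.List.pyGetD data r ""
        if (PySem.Set.ofList row.toList).length = 1 ∧ PySem.Str.pyGet? row 0 = some '.' then
          result.insert r (result.getD (r - 1) 0 + er)
        else
          result.insert r (result.getD (r - 1) 0 + 1)) d).items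
      = d.items ++ go er (data.drop k) (k : Int) t := by
  intro m
  induction m with
  | zero =>
    intro k d t hk _ _
    have hk' : (k : Int) = (data.length : Int) := by omega
    rw [hk', PySem.List.pyRange_one_eq_nil (le_refl _)]
    simp [List.drop_eq_nil_of_le (by omega : data.length ≤ k), go]
  | succ m ih =>
    intro k d t hk hkeys hget
    have hlt : (k : Int) < (data.length : Int) := by omega
    rw [PySem.List.pyRange_one_cons hlt]
    have hklen : k < data.length := by omega
    have hrow : PySem.List.pyGetD data (k : Int) "" = data[k] := by
      rw [PySem.List.pyGetD_natCast]
      simp [List.getD, hklen]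
    have hcontains : d.contains (k : Int) = false := by
      simp only [PySem.Dict.contains, List.any_eq_false]
      intro p hp
      have := hkeys p hp
      simp only [beq_iff_eq]
      omega
    have hins : ∀ v : Int, (d.insert (k : Int) v).items = d.items ++ [((k : Int), v)] := by
      intro v; simp [PySem.Dict.insert, hcontains]
    have hget' : ∀ v : Int, (d.insert (k : Int) v).getD ((k : Int) + 1 - 1) 0 = v := by
      intro v
      have hnone : d.items.find? (fun p => p.1 == (k : Int)) = none := by
        apply List.find?_eq_none.mpr
        intro p hp
        have := hkeys p hp
        simp only [beq_iff_eq]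
        omega
      simp [PySem.Dict.getD, PySem.Dict.get?, hins, List.find?_append, hnone]
    have hkeys' : ∀ v : Int, ∀ p ∈ (d.insert (k : Int) v).items, p.1 < ((k : Int) + 1) := by
      intro v p hp
      rw [hins] at hp
      rcases List.mem_append.mp hp with h | h
      · have := hkeys p h; omega
      · rcases List.mem_singleton.mp h with rfl
        exact lt_add_one _
    have hdrop : data.drop k = data[k] :: data.drop (k + 1) := List.drop_eq_getElem_cons hklen
    simp only [List.foldl_cons, hrow, hget]
    by_cases hc : (PySem.Set.ofList (data[k]).toList).length = 1 ∧ PySem.Str.pyGet? data[k] 0 = some '.'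
    · have hw : rowW er data[k] = er := by unfold rowW; rw [if_pos hc]
      rw [if_pos hc]
      have := ih (k + 1) (d.insert (k : Int) (t + er)) (t + er) (by omega) (by exact_mod_cast hkeys' (t + er)) (by exact_mod_cast hget' (t + er))
      rw [show ((k : Int) + 1) = ((k + 1 : Nat) : Int) by push_cast; ring] at *
      rw [this, hins, hdrop]
      simp [go, hw]
    · have hw : rowW er data[k] = 1 := by unfold rowW; rw [if_neg hc]
      rw [if_neg hc]
      have := ih (k + 1) (d.insert (k : Int) (t + 1)) (t + 1) (by omega) (by exact_mod_cast hkeys' (t + 1)) (by exact_mod_cast hget' (t + 1))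
      rw [show ((k : Int) + 1) = ((k + 1 : Nat) : Int) by push_cast; ring] at *
      rw [this, hins, hdrop]
      simp [go, hw]

theorem a_eq_go (data : List String) (er : Int) : effective_row data er = go er data 0 0 := by
  unfold effective_row
  have := A_loop er data data.length 0 { items := [] } 0 (by omega)
    (by intro p hp; simp at hp) (by simp [PySem.Dict.getD, PySem.Dict.get?])
  simpa using this

-- ===== VERDICT (by name: the statement is the Claim_ definition above) =====
theorem effective_row_spec : Claim_equal_effective_row := by
  intro data er _
  unfold Spec_effective_row
  rw [a_eq_go, alt_eq_go]
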